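-- pv_equiv track=rewrite | github.com/anmol2982002/mcp-developer-assistant | ai/risk_feature_extractor.py | _count_new_dependencies
-- ===== SOURCE A (Python) =====
-- from typing import Any, Dict, List, Optional, Tuple
--
-- def _count_new_dependencies(diff: str, files: List[str]) -> int:
--     """Count newly added dependencies in common dependency files."""
--     dep_files = ["requirements.txt", "pyproject.toml", "package.json", "Cargo.toml", "go.mod"]
--     count = 0
--
--     for dep_file in dep_files:
--         if any(dep_file in f for f in files):
--             # Count added lines in dependency files
--             in_dep_section = False
--             for line in diff.splitlines():
--                 if dep_file in line:
--                     in_dep_section = True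
--                 elif line.startswith("diff --git"):
--                     in_dep_section = False
--                 elif in_dep_section and line.startswith("+") and not line.startswith("+++"):
--                     # Simple heuristic: new lines in dep files are new deps
--                     if "=" in line or ":" in line or "@" in line:
--                         count += 1
--
--     return count
-- ===== SOURCE B (Python) =====
-- def _count_new_dependencies(diff: str, files: list) -> int:
--     """Count newly added dependencies in common dependency files (single pass)."""
--     dep_files = ["requirements.txt", "pyproject.toml", "package.json", "Cargo.toml", "go.mod"]
--     open_state = {d: False for d in dep_files if any(d in f for f in files)}
--     count = 0
--     for line in diff.splitlines():
--         is_new_file = line.startswith("diff --git")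
--         is_add = (line.startswith("+") and not line.startswith("+++")
--                   and ("=" in line or ":" in line or "@" in line))
--         for d in open_state:
--             if d in line:
--                 open_state[d] = True
--             elif is_new_file:
--                 open_state[d] = False
--             elif open_state[d] and is_add:
--                 count += 1
--     return count
-- ===== Notes on version B (the rewrite author's own statement) =====
-- stated objective: alternative
-- what changed: Replaces A's five separate full scans of the diff (one state machine per dependency file) by a single pass over the lines that maintains a per-present-dep-file open flag and sums the contributions using the pre-line flags.
import Mathlib
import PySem

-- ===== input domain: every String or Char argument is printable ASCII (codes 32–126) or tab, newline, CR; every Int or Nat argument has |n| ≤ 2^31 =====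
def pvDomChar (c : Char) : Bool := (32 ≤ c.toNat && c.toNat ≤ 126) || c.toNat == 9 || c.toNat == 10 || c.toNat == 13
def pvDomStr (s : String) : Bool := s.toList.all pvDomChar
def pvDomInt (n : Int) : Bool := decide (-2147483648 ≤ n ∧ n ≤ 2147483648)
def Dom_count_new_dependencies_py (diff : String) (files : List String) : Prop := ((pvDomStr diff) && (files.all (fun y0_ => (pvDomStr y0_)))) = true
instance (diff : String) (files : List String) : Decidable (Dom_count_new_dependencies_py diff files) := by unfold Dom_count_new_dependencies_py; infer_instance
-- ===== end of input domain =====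

-- B replaces A's five full scans of the diff by one single pass that tracks a per-dep-file open flag; same result (alternative decomposition, same measured cost).

-- ===== PORT A =====
-- A's inner loop body, step for step (branch order preserved)
def cndAStep (dep_file : String) (st : Bool × Int) (line : String) : Bool × Int :=
  if PySem.Str.isIn dep_file line then (true, st.2)
  else if PySem.Str.startswith line "diff --git" then (false, st.2)
  else if st.1 && PySem.Str.startswith line "+" && !PySem.Str.startswith line "+++" then
    (if PySem.Str.isIn "=" line || PySem.Str.isIn ":" line || PySem.Str.isIn "@" line then
      (st.1, st.2 + 1) else st)
  else st

def count_new_dependencies_py (diff : String) (files : List String) : Int :=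
  let dep_files := ["requirements.txt", "pyproject.toml", "package.json", "Cargo.toml", "go.mod"]
  dep_files.foldl (fun count dep_file =>
    if files.any (fun f => PySem.Str.isIn dep_file f) then
      ((PySem.Str.splitlines diff).foldl (cndAStep dep_file) (false, count)).2
    else count) 0

-- ===== PORT B =====
-- B's single pass: per present dep file an open flag; count uses the pre-line flags
def cndLoopB (lines : List String) (st : List (String × Bool)) (c : Int) : Int :=
  match lines with
  | [] => c
  | line :: rest =>
    let isNewFile := PySem.Str.startswith line "diff --git"
    let isAdd := PySem.Str.startswith line "+" && !PySem.Str.startswith line "+++" &&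
      (PySem.Str.isIn "=" line || PySem.Str.isIn ":" line || PySem.Str.isIn "@" line)
    let c' := c + (st.map (fun db =>
      if PySem.Str.isIn db.1 line then (0 : Int)
      else if isNewFile then 0
      else if db.2 && isAdd then 1 else 0)).sum
    let st' := st.map (fun db =>
      (db.1, if PySem.Str.isIn db.1 line then true
             else if isNewFile then false
             else db.2))
    cndLoopB rest st' c'

def count_new_dependencies_py_alt (diff : String) (files : List String) : Int :=
  let dep_files := ["requirements.txt", "pyproject.toml", "package.json", "Cargo.toml", "go.mod"]
  let present := dep_files.filter (fun d => files.any (fun f => PySem.Str.isIn d f))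
  cndLoopB (PySem.Str.splitlines diff) (present.map (fun d => (d, false))) 0

-- ===== PRECONDITION & SPEC =====
def Spec_count_new_dependencies_py (diff : String) (files : List String) (out : Int) : Prop := out = count_new_dependencies_py_alt diff files
instance (diff : String) (files : List String) (out : Int) : Decidable (Spec_count_new_dependencies_py diff files out) := by unfold Spec_count_new_dependencies_py; infer_instance

-- ===== CLAIM (what is proved, stated in full; the proofs are below) =====
def Claim_equal_count_new_dependencies_py : Prop := ∀ (diff : String) (files : List String), Dom_count_new_dependencies_py diff files → Spec_count_new_dependencies_py diff files (count_new_dependencies_py diff files)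

-- ===== LEMMAS AND PROOFS =====

-- the per-dep count of A's inner loop, started with flag b and count 0
def cndInner (dep : String) (lines : List String) (b : Bool) : Int :=
  (lines.foldl (cndAStep dep) (b, 0)).2

-- A's step splits into a flag update and a count increment
lemma cndAStep_eq (dep : String) (b : Bool) (c : Int) (line : String) :
    cndAStep dep (b, c) line =
      ((if PySem.Str.isIn dep line then true
        else if PySem.Str.startswith line "diff --git" then false
        else b),
       c + (if PySem.Str.isIn dep line then (0 : Int)
            else if PySem.Str.startswith line "diff --git" then 0
            else if b && (PySem.Str.startswith line "+" && !PySem.Str.startswith line "+++" &&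
              (PySem.Str.isIn "=" line || PySem.Str.isIn ":" line || PySem.Str.isIn "@" line)) then 1
            else 0)) := by
  simp only [cndAStep]
  cases hb : b <;> split_ifs <;> simp_all

-- accumulator lemma for A's inner loop
lemma cndInner_acc (dep : String) (lines : List String) : ∀ (b : Bool) (c : Int),
    (lines.foldl (cndAStep dep) (b, c)).2 = c + cndInner dep lines b := by
  induction lines with
  | nil => intro b c; simp [cndInner]
  | cons l ls ih =>
    intro b c
    simp only [List.foldl_cons, cndAStep_eq, cndInner]
    rw [ih, ih]
    simp only [cndInner]
    omega

-- peeling one line off A's inner loop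
lemma cndInner_cons (dep l : String) (ls : List String) (b : Bool) :
    cndInner dep (l :: ls) b =
      (if PySem.Str.isIn dep l then (0 : Int)
       else if PySem.Str.startswith l "diff --git" then 0
       else if b && (PySem.Str.startswith l "+" && !PySem.Str.startswith l "+++" &&
         (PySem.Str.isIn "=" l || PySem.Str.isIn ":" l || PySem.Str.isIn "@" l)) then 1 else 0)
      + cndInner dep ls
          (if PySem.Str.isIn dep l then true
           else if PySem.Str.startswith l "diff --git" then false
           else b) := by
  simp only [cndInner, List.foldl_cons, cndAStep_eq]
  rw [cndInner_acc]
  simp only [cndInner, zero_add]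

-- B's single pass computes the sum of A's per-dep inner counts
lemma cndLoopB_eq (lines : List String) : ∀ (st : List (String × Bool)) (c : Int),
    cndLoopB lines st c = c + (st.map (fun db => cndInner db.1 lines db.2)).sum := by
  induction lines with
  | nil => intro st c; simp [cndLoopB, cndInner]
  | cons l ls ih =>
    intro st c
    simp only [cndLoopB]
    rw [ih]
    simp only [List.map_map]
    have hsum : ∀ (f g : String × Bool → Int) (xs : List (String × Bool)),
        (xs.map f).sum + (xs.map g).sum = (xs.map (fun x => f x + g x)).sum := by
      intro f g xs
      induction xs with
      | nil => simp
      | cons x xs ihx => simp only [List.map_cons, List.sum_cons, ← ihx]; ring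
    rw [add_assoc, hsum]
    congr 1
    refine congrArg List.sum (List.map_congr_left ?_)
    intro db _
    simp only [Function.comp]
    rw [cndInner_cons]

-- A's outer fold equals the filtered sum of inner counts
lemma cndAFold (diff : String) (files : List String) :
    ∀ (deps : List String) (c : Int),
      deps.foldl (fun count dep_file =>
        if files.any (fun f => PySem.Str.isIn dep_file f) then
          ((PySem.Str.splitlines diff).foldl (cndAStep dep_file) (false, count)).2
        else count) c
      = c + ((deps.filter (fun d => files.any (fun f => PySem.Str.isIn d f))).map
          (fun d => cndInner d (PySem.Str.splitlines diff) false)).sum := by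
  intro deps
  induction deps with
  | nil => intro c; simp
  | cons d ds ih =>
    intro c
    rw [List.foldl_cons, ih]
    by_cases h : (files.any (fun f => PySem.Str.isIn d f)) = true
    · rw [if_pos h, cndInner_acc,
        List.filter_cons_of_pos (p := fun d => files.any fun f => PySem.Str.isIn d f) h,
        List.map_cons, List.sum_cons]
      ring
    · rw [if_neg h,
        List.filter_cons_of_neg (p := fun d => files.any fun f => PySem.Str.isIn d f) h]

-- ===== VERDICT (by name: the statement is the Claim_ definition above) =====
theorem count_new_dependencies_py_spec : Claim_equal_count_new_dependencies_py := by
  intro diff files _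
  unfold Spec_count_new_dependencies_py count_new_dependencies_py count_new_dependencies_py_alt
  rw [cndAFold, cndLoopB_eq]
  simp only [List.map_map, zero_add]
  rfl
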